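-- pv_equiv track=rewrite | github.com/khicken/CSDS310 | Presentation/main.py | starmaxxing2
-- ===== SOURCE A (Python) =====
-- def starmaxxing2(S) -> int:
--     n = len(S)
--     cs = 0
--     pc_e0 = 0
--     pc_g0 = 0
--
--     sf = [0] * (2 * n + 1)
--     sf[n] += 1
--
--     c = 0
--     for i in range(0, n):
--         if S[i] == 1:
--             cs = cs + 1
--             cc_g0 = 1 + pc_e0 + pc_g0
--         else:
--             cs = cs - 1
--             cc_g0 = pc_g0 - sf[cs + n]
--
--         pc_e0 = sf[cs + n]
--         pc_g0 = cc_g0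
--         sf[cs + n] = sf[cs+n] + 1
--         c += cc_g0
--     return c
-- ===== SOURCE B (Python) =====
-- def starmaxxing2(S) -> int:
--     # For each step, count previously seen prefix sums strictly below the
--     # current prefix sum, rescanning the recorded list (no frequency table).
--     total = 0
--     seen = [0]
--     cs = 0
--     for x in S:
--         cs += 1 if x == 1 else -1
--         total += sum(1 for p in seen if p < cs)
--         seen.append(cs)
--     return total
-- ===== Notes on version B (the rewrite author's own statement) =====
-- stated objective: simpler
-- what changed: Replaces A's frequency table sf plus incrementally maintained counters pc_e0/pc_g0 with a direct rescan: keep the list of recorded prefix sums and, at each step, count how many of them are strictly below the current prefix sum.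
import Mathlib
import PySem

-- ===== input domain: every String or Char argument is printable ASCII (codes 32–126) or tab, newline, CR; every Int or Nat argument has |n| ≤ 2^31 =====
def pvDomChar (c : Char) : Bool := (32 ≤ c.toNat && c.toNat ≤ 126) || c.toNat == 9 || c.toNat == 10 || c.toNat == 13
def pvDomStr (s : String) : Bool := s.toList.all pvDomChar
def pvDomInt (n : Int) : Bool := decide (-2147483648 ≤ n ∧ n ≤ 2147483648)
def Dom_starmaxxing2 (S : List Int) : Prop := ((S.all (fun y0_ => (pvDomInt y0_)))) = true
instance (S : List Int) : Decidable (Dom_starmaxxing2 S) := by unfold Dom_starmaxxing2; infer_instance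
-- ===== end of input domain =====

-- B replaces A's frequency table + incremental counters by rescanning the list of
-- recorded prefix sums at each step (simpler; not faster: O(n^2) vs A's O(n)).

-- ===== PORT A =====
-- Loop body of A ("for i in range(0, n)" visits S's elements in order, so we fold
-- over S directly). State = (cs, pc_e0, pc_g0, sf, c). Inside the loop the index
-- cs + n is always in [0, 2n] (|cs| never exceeds the number of consumed elements),
-- so `.toNat` is exact here: Python never sees a negative or out-of-range index.
def stepA (n : Nat) (st : Int × Int × Int × List Int × Int) (x : Int) :
    Int × Int × Int × List Int × Int :=
  let cs := st.1
  let pc_e0 := st.2.1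
  let pc_g0 := st.2.2.1
  let sf := st.2.2.2.1
  let c := st.2.2.2.2
  let cs' := if x == 1 then cs + 1 else cs - 1
  let cc_g0 := if x == 1 then 1 + pc_e0 + pc_g0
               else pc_g0 - sf.getD (cs' + (n : Int)).toNat 0
  let pc_e0' := sf.getD (cs' + (n : Int)).toNat 0
  let sf' := sf.set (cs' + (n : Int)).toNat (sf.getD (cs' + (n : Int)).toNat 0 + 1)
  (cs', pc_e0', cc_g0, sf', c + cc_g0)

def starmaxxing2 (S : List Int) : Int :=
  let n := S.length
  let sf0 := (List.replicate (2 * n + 1) (0 : Int)).set n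
      ((List.replicate (2 * n + 1) (0 : Int)).getD n 0 + 1)   -- sf[n] += 1
  (S.foldl (stepA n) (0, 0, 0, sf0, 0)).2.2.2.2

-- ===== PORT B =====
-- State = (total, seen, cs); `sum(1 for p in seen if p < cs)` is a count over seen.
def stepB (st : Int × List Int × Int) (x : Int) : Int × List Int × Int :=
  let total := st.1
  let seen := st.2.1
  let cs := st.2.2
  let cs' := cs + (if x == 1 then 1 else -1)
  (total + (seen.countP (fun p => decide (p < cs')) : Int), seen ++ [cs'], cs')

def starmaxxing2_alt (S : List Int) : Int :=
  (S.foldl stepB (0, [0], 0)).1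

-- ===== PRECONDITION & SPEC =====
def Spec_starmaxxing2 (S : List Int) (out : Int) : Prop := out = starmaxxing2_alt S
instance (S : List Int) (out : Int) : Decidable (Spec_starmaxxing2 S out) := by unfold Spec_starmaxxing2; infer_instance

-- ===== CLAIM (what is proved, stated in full; the proofs are below) =====
def Claim_equal_starmaxxing2 : Prop := ∀ (S : List Int), Dom_starmaxxing2 S → Spec_starmaxxing2 S (starmaxxing2 S)

-- ===== LEMMAS AND PROOFS =====

-- Common specification: seen = prefix sums recorded so far, cs = current prefix sum.
def goSpec (seen : List Int) (cs : Int) : List Int → Int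
  | [] => 0
  | x :: xs =>
      ((seen.countP (fun p => decide (p < cs + (if x == 1 then 1 else -1)))) : Int)
        + goSpec (seen ++ [cs + (if x == 1 then 1 else -1)])
            (cs + (if x == 1 then 1 else -1)) xs

lemma countP_lt_succ (l : List Int) (c : Int) :
    l.countP (fun v => decide (v < c + 1)) =
      l.countP (fun v => decide (v < c)) + l.countP (fun v => v == c) := by
  induction l with
  | nil => simp
  | cons a l ih =>
      simp only [List.countP_cons, ih, beq_iff_eq]
      by_cases h : a = c
      · subst h; simp; omega
      · by_cases h2 : a < c
        · have : a < c + 1 := by omega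
          simp [h, h2, this]; omega
        · have : ¬ a < c + 1 := by omega
          simp [h, h2, this]

lemma getD_set_int (l : List Int) (i k : Nat) (a : Int) :
    (l.set i a).getD k 0 = if i = k ∧ i < l.length then a else l.getD k 0 := by
  simp only [List.getD_eq_getElem?_getD, List.getElem?_set]
  by_cases hik : i = k
  · subst hik
    by_cases hl : i < l.length
    · simp [hl]
    · simp [hl]
  · simp [hik]

lemma B_loop (rest : List Int) : ∀ (total cs : Int) (seen : List Int),
    (rest.foldl stepB (total, seen, cs)).1 = total + goSpec seen cs rest := by
  induction rest with
  | nil => intro total cs seen; simp [goSpec]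
  | cons x xs ih =>
      intro total cs seen
      simp only [List.foldl_cons, stepB, goSpec, ih]
      ring

lemma A_loop (rest : List Int) : ∀ (n : Nat) (prev : List Int) (cs pc_e0 pc_g0 c : Int)
    (sf : List Int),
    sf.length = 2 * n + 1 →
    (∀ k : Nat, k < 2 * n + 1 →
        sf.getD k 0 = ((prev ++ [cs]).countP (fun v => v == (k : Int) - n) : Int)) →
    cs.natAbs + rest.length ≤ n →
    pc_e0 = (prev.countP (fun v => v == cs) : Int) →
    pc_g0 = (prev.countP (fun v => decide (v < cs)) : Int) →
    (rest.foldl (stepA n) (cs, pc_e0, pc_g0, sf, c)).2.2.2.2 = c + goSpec (prev ++ [cs]) cs rest := by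
  induction rest with
  | nil => intro n prev cs pc_e0 pc_g0 c sf _ _ _ _ _; simp [goSpec]
  | cons x xs ih =>
      intro n prev cs pc_e0 pc_g0 c sf hlen hsf hbound hpe hpg
      have hxslen : cs.natAbs + xs.length + 1 ≤ n := by
        simp only [List.length_cons] at hbound; omega
      set cs' : Int := if x == 1 then cs + 1 else cs - 1 with hcs'
      have hd : cs' = cs + (if x == 1 then 1 else -1) := by
        rw [hcs']; split_ifs <;> ring
      have hcs'abs : cs'.natAbs ≤ cs.natAbs + 1 := by
        rw [hcs']; split_ifs <;> omega
      have hbound' : cs'.natAbs + xs.length ≤ n := by omega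
      have hge : (0 : Int) ≤ cs' + n := by omega
      have hlt : (cs' + (n : Int)).toNat < 2 * n + 1 := by omega
      have hidx : (((cs' + (n : Int)).toNat : Int)) = cs' + n := Int.toNat_of_nonneg hge
      -- the value stored at the current index = multiplicity of cs' among prev ++ [cs]
      have hread : sf.getD (cs' + (n : Int)).toNat 0 =
          (((prev ++ [cs]).countP (fun v => v == cs')) : Int) := by
        rw [hsf _ hlt]
        have hval : (((cs' + (n : Int)).toNat : Int)) - n = cs' := by omega
        simp only [hval]
      -- cc_g0 equals the count of recorded prefixes strictly below cs'
      have hcc : (if x == 1 then 1 + pc_e0 + pc_g0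
            else pc_g0 - sf.getD (cs' + (n : Int)).toNat 0) =
          (((prev ++ [cs]).countP (fun p => decide (p < cs'))) : Int) := by
        by_cases h : (x == 1) = true
        · have hc1 : cs' = cs + 1 := by rw [hcs', if_pos h]
          rw [if_pos h, hpe, hpg, hc1, List.countP_append, countP_lt_succ]
          have h1 : [cs].countP (fun p => decide (p < cs + 1)) = 1 := by simp
          rw [h1]; push_cast; ring
        · have hc1 : cs' = cs - 1 := by rw [hcs', if_neg h]
          rw [if_neg h, hpg, hread]
          have h2 : (prev ++ [cs]).countP (fun v => v == cs') =
              prev.countP (fun v => v == cs') := by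
            have hz : (cs == cs') = false := by
              simp only [hc1, beq_eq_false_iff_ne, ne_eq]
              omega
            rw [List.countP_append, List.countP_cons, List.countP_nil, hz]
            simp
          rw [h2, hc1, List.countP_append]
          have h1 : [cs].countP (fun p => decide (p < cs - 1)) = 0 := by
            simp
          rw [h1]
          have hsplit := countP_lt_succ prev (cs - 1)
          rw [show cs - 1 + 1 = cs from by ring] at hsplit
          push_cast
          omega
      simp only [List.foldl_cons]
      have hstep : stepA n (cs, pc_e0, pc_g0, sf, c) x =
          (cs', sf.getD (cs' + (n : Int)).toNat 0,
           (((prev ++ [cs]).countP (fun p => decide (p < cs'))) : Int),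
           sf.set (cs' + (n : Int)).toNat (sf.getD (cs' + (n : Int)).toNat 0 + 1),
           c + (((prev ++ [cs]).countP (fun p => decide (p < cs'))) : Int)) := by
        simp only [stepA, ← hcs', ← hcc]
      rw [hstep]
      rw [ih n (prev ++ [cs]) cs' _ _ _ _ (by simpa using hlen)
        (by
          intro k hk
          rw [getD_set_int]
          by_cases hk2 : (cs' + (n : Int)).toNat = k
          · rw [if_pos ⟨hk2, by omega⟩, hread]
            have hkv : (k : Int) - n = cs' := by omega
            simp only [hkv]
            rw [List.countP_append (l₁ := prev ++ [cs]) (l₂ := [cs'])]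
            have h1 : [cs'].countP (fun v => v == cs') = 1 := by simp
            rw [h1]; push_cast; ring
          · rw [if_neg (fun hcon => hk2 hcon.1), hsf k hk]
            congr 1
            rw [List.countP_append (l₁ := prev ++ [cs]) (l₂ := [cs'])]
            have h1 : [cs'].countP (fun v => v == (k : Int) - n) = 0 := by
              simp; omega
            rw [h1, Nat.add_zero])
        hbound' (by rw [hread]) rfl]
      simp only [goSpec, ← hd]
      ring

theorem starmaxxing2_eq_go (S : List Int) : starmaxxing2 S = goSpec [0] 0 S := by
  unfold starmaxxing2
  have hrep : ∀ j : Nat, (List.replicate (2 * S.length + 1) (0 : Int)).getD j 0 = 0 := by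
    intro j
    rw [List.getD_eq_getElem?_getD, List.getElem?_replicate]
    split <;> simp
  have h := A_loop S S.length [] 0 0 0 0
      ((List.replicate (2 * S.length + 1) (0 : Int)).set S.length
        ((List.replicate (2 * S.length + 1) (0 : Int)).getD S.length 0 + 1))
      (by simp)
      (by
        intro k hk
        rw [getD_set_int]
        by_cases hek : S.length = k
        · rw [if_pos ⟨hek, by rw [List.length_replicate]; omega⟩, hrep]
          have hz : (k : Int) - S.length = 0 := by omega
          simp [hz]
        · rw [if_neg (fun hcon => hek hcon.1), hrep]
          have hne : ((0 : Int) == (k : Int) - S.length) = false := by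
            simp only [beq_eq_false_iff_ne, ne_eq]
            omega
          simp [hne])
      (by simp) (by simp) (by simp)
  simpa using h

theorem starmaxxing2_alt_eq_go (S : List Int) : starmaxxing2_alt S = goSpec [0] 0 S := by
  unfold starmaxxing2_alt
  rw [B_loop]
  ring

-- ===== VERDICT (by name: the statement is the Claim_ definition above) =====
theorem starmaxxing2_spec : Claim_equal_starmaxxing2 := by
  intro S _
  unfold Spec_starmaxxing2
  rw [starmaxxing2_eq_go, starmaxxing2_alt_eq_go]
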